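-- pv_equiv track=rewrite | github.com/motuskov/Python_lessons_basic | lesson04/home_work/hw04_normal.py | task_1_wo_re
-- ===== SOURCE A (Python) =====
-- def task_1_wo_re(text):
--     lowercase_letters = list(map(chr, range(ord('a'), ord('z') + 1)))
--     capital_letters = list(map(chr, range(ord('A'), ord('Z') + 1)))
--     result = []
--     prev_ch = ""
--     word = ""
--     for ch in text:
--         if ch in lowercase_letters and (prev_ch in capital_letters or prev_ch == "" or len(word) > 0):
--             word += ch
--         elif ch in capital_letters and len(word) > 0:
--             result.append(word)
--             word = ""
--         prev_ch = ch
--     if len(word) > 0: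
--         result.append(word)
--     return result
-- ===== SOURCE B (Python) =====
-- def task_1_wo_re(text):
--     # split into segments delimited by capital letters, then keep segments that
--     # start with a lowercase letter, joining only their lowercase letters
--     segments = []
--     seg = []
--     for ch in text:
--         if 65 <= ord(ch) <= 90:
--             segments.append(seg)
--             seg = []
--         else:
--             seg.append(ch)
--     segments.append(seg)
--     return [''.join(c for c in s if 97 <= ord(c) <= 122)
--             for s in segments
--             if s and 97 <= ord(s[0]) <= 122]
-- ===== Notes on version B (the rewrite author's own statement) =====
-- stated objective: alternative
-- what changed: A's single state machine tracking prev_ch and a growing word (with 26-element list membership tests per character) is replaced by splitting the text into segments at capital letters and a filter/join comprehension keeping segments that start with a lowercase letter.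
import Mathlib
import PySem

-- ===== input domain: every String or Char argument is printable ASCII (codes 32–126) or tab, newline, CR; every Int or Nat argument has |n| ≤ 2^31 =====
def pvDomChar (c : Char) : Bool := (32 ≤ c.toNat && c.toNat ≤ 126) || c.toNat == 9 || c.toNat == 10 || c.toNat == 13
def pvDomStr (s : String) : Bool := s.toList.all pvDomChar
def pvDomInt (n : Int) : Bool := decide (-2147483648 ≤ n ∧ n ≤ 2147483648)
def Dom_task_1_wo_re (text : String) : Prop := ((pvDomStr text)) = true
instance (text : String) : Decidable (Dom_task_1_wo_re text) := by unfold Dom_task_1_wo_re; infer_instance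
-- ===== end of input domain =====

-- B replaces A's prev-char/word state machine by a split-into-segments-at-capitals
-- pass followed by a filter/join comprehension (objective: alternative decomposition).

-- ===== PORT A =====
-- list(map(chr, range(ord('a'), ord('z') + 1)))
def pvLowerLetters : List Char := (PySem.List.pyRange 97 123 1).map (fun n => Char.ofNat n.toNat)
-- list(map(chr, range(ord('A'), ord('Z') + 1)))
def pvCapitalLetters : List Char := (PySem.List.pyRange 65 91 1).map (fun n => Char.ofNat n.toNat)

-- one iteration of A's for-loop; prev_ch = "" is modelled as `none`
-- (`prev_ch in capital_letters` is False for prev_ch = "", hence the `.elim false`)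
def pvStepA (st : List (List Char) × Option Char × List Char) (ch : Char) :
    List (List Char) × Option Char × List Char :=
  let (result, prev, word) := st
  if decide (ch ∈ pvLowerLetters) &&
      (prev.elim false (fun p => decide (p ∈ pvCapitalLetters)) || decide (prev = none) ||
        decide (word.length > 0)) then
    (result, some ch, word ++ [ch])
  else if decide (ch ∈ pvCapitalLetters) && decide (word.length > 0) then
    (result ++ [word], some ch, [])
  else
    (result, some ch, word)

def task_1_wo_re (text : String) : List String :=
  let st := text.toList.foldl pvStepA ([], none, [])
  (if st.2.2.length > 0 then st.1 ++ [st.2.2] else st.1).map (fun w => String.mk w)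

-- ===== PORT B =====
-- 65 <= ord(ch) <= 90
def pvIsCap (c : Char) : Bool := decide (65 ≤ c.toNat ∧ c.toNat ≤ 90)
-- 97 <= ord(c) <= 122
def pvIsLow (c : Char) : Bool := decide (97 ≤ c.toNat ∧ c.toNat ≤ 122)

-- one iteration of B's segment-splitting loop
def pvStepB (st : List (List Char) × List Char) (ch : Char) : List (List Char) × List Char :=
  let (segments, seg) := st
  if pvIsCap ch then (segments ++ [seg], []) else (segments, seg ++ [ch])

-- `s and 97 <= ord(s[0]) <= 122`
def pvKeepSeg : List Char → Bool
  | [] => false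
  | c :: _ => pvIsLow c

-- `''.join(c for c in s if 97 <= ord(c) <= 122)`
def pvJoinLow (s : List Char) : List Char := s.filter pvIsLow

def task_1_wo_re_alt (text : String) : List String :=
  let st := text.toList.foldl pvStepB ([], [])
  (((st.1 ++ [st.2]).filter pvKeepSeg).map pvJoinLow).map (fun w => String.mk w)

-- ===== PRECONDITION & SPEC =====
def Spec_task_1_wo_re (text : String) (out : List String) : Prop := out = task_1_wo_re_alt text
instance (text : String) (out : List String) : Decidable (Spec_task_1_wo_re text out) := by unfold Spec_task_1_wo_re; infer_instance

-- ===== CLAIM (what is proved, stated in full; the proofs are below) =====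
def Claim_equal_task_1_wo_re : Prop := ∀ (text : String), Dom_task_1_wo_re text → Spec_task_1_wo_re text (task_1_wo_re text)

-- ===== LEMMAS AND PROOFS =====

theorem pv_mem_lower (c : Char) : c ∈ pvLowerLetters ↔ (97 ≤ c.toNat ∧ c.toNat ≤ 122) := by
  simp only [pvLowerLetters, List.mem_map, PySem.List.mem_pyRange_one]
  constructor
  · rintro ⟨n, ⟨h1, h2⟩, rfl⟩
    interval_cases n <;> decide
  · rintro ⟨h1, h2⟩
    exact ⟨(c.toNat : Int), ⟨by exact_mod_cast h1, by omega⟩, by simp [Char.ofNat_toNat]⟩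

theorem pv_mem_cap (c : Char) : c ∈ pvCapitalLetters ↔ (65 ≤ c.toNat ∧ c.toNat ≤ 90) := by
  simp only [pvCapitalLetters, List.mem_map, PySem.List.mem_pyRange_one]
  constructor
  · rintro ⟨n, ⟨h1, h2⟩, rfl⟩
    interval_cases n <;> decide
  · rintro ⟨h1, h2⟩
    exact ⟨(c.toNat : Int), ⟨by exact_mod_cast h1, by omega⟩, by simp [Char.ofNat_toNat]⟩

theorem pv_decLow (c : Char) : decide (c ∈ pvLowerLetters) = pvIsLow c := by
  unfold pvIsLow; exact decide_eq_decide.mpr (pv_mem_lower c)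

theorem pv_decCap (c : Char) : decide (c ∈ pvCapitalLetters) = pvIsCap c := by
  unfold pvIsCap; exact decide_eq_decide.mpr (pv_mem_cap c)

theorem pv_low_not_cap (c : Char) (h : pvIsLow c = true) : pvIsCap c = false := by
  simp [pvIsLow] at h; simp [pvIsCap]; omega

-- A's word, expressed from B's current segment
def pvWordOf (seg : List Char) : List Char := if pvKeepSeg seg then pvJoinLow seg else []

-- what A knows about prev_ch, expressed from B's current segment
def pvPrevOk (prev : Option Char) (seg : List Char) : Prop :=
  match seg with
  | [] => prev = none ∨ ∃ p, prev = some p ∧ pvIsCap p = true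
  | _ :: _ => ∃ p, prev = some p ∧ pvIsCap p = false

-- the coupling invariant between A's and B's loop states
def pvInv (sa : List (List Char) × Option Char × List Char) (sb : List (List Char) × List Char) : Prop :=
  sa.1 = (sb.1.filter pvKeepSeg).map pvJoinLow ∧ sa.2.2 = pvWordOf sb.2 ∧ pvPrevOk sa.2.1 sb.2

theorem pv_keep_join_ne (s : List Char) (h : pvKeepSeg s = true) : pvJoinLow s ≠ [] := by
  match s with
  | [] => simp [pvKeepSeg] at h
  | c :: t =>
    simp only [pvKeepSeg] at h
    simp [pvJoinLow, h]

theorem pv_step_inv (sa : List (List Char) × Option Char × List Char)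
    (sb : List (List Char) × List Char) (ch : Char) (h : pvInv sa sb) :
    pvInv (pvStepA sa ch) (pvStepB sb ch) := by
  obtain ⟨result, prev, word⟩ := sa
  obtain ⟨segments, seg⟩ := sb
  obtain ⟨hres, hword, hprev⟩ := h
  simp only at hres hword hprev
  subst hres hword
  simp only [pvStepA, pvStepB, pv_decLow, pv_decCap]
  by_cases hc : pvIsCap ch = true
  · -- capital: B closes the segment; A flushes word if nonempty
    have hlf : pvIsLow ch = false := by simp [pvIsCap] at hc; simp [pvIsLow]; omega
    by_cases hk : pvKeepSeg seg = true
    · have hw : pvWordOf seg = pvJoinLow seg := by simp [pvWordOf, hk]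
      have hjl : 0 < (pvJoinLow seg).length :=
        List.length_pos_iff.mpr (pv_keep_join_ne seg hk)
      refine ⟨?_, ?_, ?_⟩
      · simp [hc, hlf, hw, hjl, List.filter_append, hk]
      · simp [hc, hlf, hw, hjl]
        simp [pvWordOf, pvKeepSeg]
      · simp [hc, hlf, hw, hjl, pvPrevOk]
        try exact Or.inr ⟨ch, rfl, hc⟩
    · have hkf : pvKeepSeg seg = false := by revert hk; cases pvKeepSeg seg <;> simp
      have hw : pvWordOf seg = [] := by simp [pvWordOf, hkf]
      refine ⟨?_, ?_, ?_⟩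
      · simp [hc, hlf, hw, List.filter_append, hkf]
      · simp [hc, hlf, hw]
        simp [pvWordOf, pvKeepSeg]
      · simp [hc, hlf, hw, pvPrevOk]
        try exact Or.inr ⟨ch, rfl, hc⟩
  · by_cases hl : pvIsLow ch = true
    · -- lowercase, not capital: B extends the segment; A extends word iff segment keeps
      have hcl : pvIsCap ch = false := pv_low_not_cap ch hl
      match seg, hprev with
      | [], hprev =>
        have hw : pvWordOf ([] : List Char) = [] := by simp [pvWordOf, pvKeepSeg]
        have hw' : pvWordOf [ch] = [ch] := by simp [pvWordOf, pvKeepSeg, hl, pvJoinLow]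
        rcases hprev with h0 | ⟨p, hp, hpc⟩
        · subst h0
          refine ⟨?_, ?_, ?_⟩
          · simp [hcl, hl, hw]
          · simp [hcl, hl, hw, hw']
          · simp [hcl, hl, hw, pvPrevOk]
            try exact ⟨ch, rfl, hcl⟩
        · subst hp
          refine ⟨?_, ?_, ?_⟩
          · simp [hcl, hl, hw, pv_decCap, hpc]
          · simp [hcl, hl, hw, hw', pv_decCap, hpc]
          · simp [hcl, hl, hw, pv_decCap, hpc, pvPrevOk]
            try exact ⟨ch, rfl, hcl⟩
      | c :: t, hprev =>
        obtain ⟨p, hp, hpc⟩ := hprev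
        subst hp
        by_cases hk : pvKeepSeg (c :: t) = true
        · have hkh : pvIsLow c = true := by simpa [pvKeepSeg] using hk
          have hw : pvWordOf (c :: t) = pvJoinLow (c :: t) := by simp [pvWordOf, hk]
          have hjl : 0 < (pvJoinLow (c :: t)).length :=
            List.length_pos_iff.mpr (pv_keep_join_ne _ hk)
          have hw' : pvWordOf (c :: (t ++ [ch])) = pvJoinLow (c :: t) ++ [ch] := by
            simp [pvWordOf, pvKeepSeg, hkh, pvJoinLow, List.filter_append, hl]
          refine ⟨?_, ?_, ?_⟩
          · simp [hcl, hl, hw, hjl]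
          · simp [hcl, hl, hw, hjl, hw']
          · simp [hcl, hl, hw, hjl, pvPrevOk]
            try exact ⟨ch, rfl, hcl⟩
        · have hkh : pvIsLow c = false := by revert hk; simp [pvKeepSeg]
          have hw : pvWordOf (c :: t) = [] := by simp [pvWordOf, pvKeepSeg, hkh]
          have hw' : pvWordOf (c :: (t ++ [ch])) = [] := by simp [pvWordOf, pvKeepSeg, hkh]
          refine ⟨?_, ?_, ?_⟩
          · simp [hcl, hl, hw, pv_decCap, hpc]
          · simp [hcl, hl, hw, hw', pv_decCap, hpc]
          · simp [hcl, hl, hw, pv_decCap, hpc, pvPrevOk]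
            try exact ⟨ch, rfl, hcl⟩
    · -- neither capital nor lowercase: transparent character
      have hlf : pvIsLow ch = false := by revert hl; cases pvIsLow ch <;> simp
      have hcf : pvIsCap ch = false := by revert hc; cases pvIsCap ch <;> simp
      match seg, hprev with
      | [], hprev =>
        have hw : pvWordOf ([] : List Char) = [] := by simp [pvWordOf, pvKeepSeg]
        have hw' : pvWordOf [ch] = [] := by simp [pvWordOf, pvKeepSeg, hlf]
        refine ⟨?_, ?_, ?_⟩
        · simp [hcf, hlf, hw]
        · simp [hcf, hlf, hw, hw']
        · simp [hcf, hlf, hw, pvPrevOk]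
          try exact ⟨ch, rfl, hcf⟩
      | c :: t, hprev =>
        have hw' : pvWordOf (c :: (t ++ [ch])) = pvWordOf (c :: t) := by
          simp only [pvWordOf, pvKeepSeg, pvJoinLow]
          by_cases hx : pvIsLow c = true <;> simp [hx, List.filter_append, hlf]
        refine ⟨?_, ?_, ?_⟩
        · simp [hcf, hlf]
        · simp [hcf, hlf, hw']
        · simp [hcf, hlf, pvPrevOk]
          try exact ⟨ch, rfl, hcf⟩

theorem pv_foldl_inv (cs : List Char) (sa : List (List Char) × Option Char × List Char)
    (sb : List (List Char) × List Char) (h : pvInv sa sb) :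
    pvInv (cs.foldl pvStepA sa) (cs.foldl pvStepB sb) := by
  induction cs generalizing sa sb with
  | nil => exact h
  | cons c t ih => exact ih _ _ (pv_step_inv _ _ _ h)

-- ===== VERDICT (by name: the statement is the Claim_ definition above) =====
theorem task_1_wo_re_spec : Claim_equal_task_1_wo_re := by
  intro text _
  unfold Spec_task_1_wo_re task_1_wo_re task_1_wo_re_alt
  have h := pv_foldl_inv text.toList ([], none, []) ([], [])
    ⟨by simp, by simp [pvWordOf, pvKeepSeg], by simp [pvPrevOk]⟩
  obtain ⟨hres, hword, -⟩ := h
  simp only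
  rw [List.filter_append, List.map_append, hres, hword]
  by_cases hk : pvKeepSeg (text.toList.foldl pvStepB ([], [])).2 = true
  · have := pv_keep_join_ne _ hk
    simp [pvWordOf, hk, List.length_pos_iff, this]
  · simp [pvWordOf, hk]
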